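-- pv_equiv track=rewrite | github.com/anticleiades/TypeProbe | genPaperV2.py | normalize_lang_name
-- ===== SOURCE A (Python) =====
-- def normalize_lang_name(name: str) -> str:
--     """
--     Paranoia-mode normalization :)
--     """
--     n = name.lower()
--     if n in ("java",):
--         return "java"
--     if n in ("pytag", "py_tag", "tagged", "pymix", "py_mix"):
--         return "pyTag"
--     if n in ("pyunt", "py_untagged", "untagged", "pyuntag"):
--         return "pyUnt"
--     if n.startswith("adv_"):
--         return normalize_lang_name(n.replace("adv_", ""))
--     return name
-- ===== SOURCE B (Python) =====
-- _TABLE = {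
--     "java": "java",
--     "pytag": "pyTag", "py_tag": "pyTag", "tagged": "pyTag",
--     "pymix": "pyTag", "py_mix": "pyTag",
--     "pyunt": "pyUnt", "py_untagged": "pyUnt", "untagged": "pyUnt",
--     "pyuntag": "pyUnt",
-- }
--
--
-- def normalize_lang_name(name: str) -> str:
--     n = name.lower()
--     stripped = False
--     while True:
--         hit = _TABLE.get(n)
--         if hit is not None:
--             return hit
--         if n.startswith("adv_"):
--             n = n.replace("adv_", "")
--             stripped = True
--         else:
--             return n if stripped else name
-- ===== Notes on version B (the rewrite author's own statement) =====
-- stated objective: idiomatic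
-- what changed: Replaces A's tail recursion and three-membership-test if-ladder with an iterative while loop over a single canonicalization dict, tracking with a flag whether any 'adv_' stripping happened to decide between returning the original name or the lowered stripped string.
import Mathlib
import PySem

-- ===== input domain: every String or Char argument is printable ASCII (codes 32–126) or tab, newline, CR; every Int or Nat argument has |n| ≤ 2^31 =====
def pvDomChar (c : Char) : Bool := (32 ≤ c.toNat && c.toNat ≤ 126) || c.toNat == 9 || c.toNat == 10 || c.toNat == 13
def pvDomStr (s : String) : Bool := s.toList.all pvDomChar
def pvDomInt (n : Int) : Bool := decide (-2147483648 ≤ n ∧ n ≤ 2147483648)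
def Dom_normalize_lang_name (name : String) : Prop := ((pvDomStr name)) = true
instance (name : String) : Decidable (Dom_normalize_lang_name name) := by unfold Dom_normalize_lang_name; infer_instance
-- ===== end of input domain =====

-- B replaces A's tail recursion and if-ladder of membership tests with an iterative
-- loop over one canonicalization dict plus a 'stripped' flag (idiomatic decomposition).


-- ===== PORT A =====
-- literal transliteration of A; the fuel argument only makes the recursion total
-- (each recursive call is on a strictly shorter string, so fuel is never exhausted)
def normAuxA : Nat → String → String
  | 0, name => name
  | fuel+1, name =>
    let n := PySem.Str.lower name
    if n == "java" then "java"
    else if n == "pytag" || n == "py_tag" || n == "tagged" || n == "pymix" || n == "py_mix" then "pyTag"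
    else if n == "pyunt" || n == "py_untagged" || n == "untagged" || n == "pyuntag" then "pyUnt"
    else if PySem.Str.startswith n "adv_" then normAuxA fuel (PySem.Str.replace n "adv_" "")
    else name

def normalize_lang_name (name : String) : String := normAuxA (name.length + 1) name

-- ===== PORT B =====
def bTable : PySem.Dict String String := PySem.Dict.mk
  [("java", "java"),
   ("pytag", "pyTag"), ("py_tag", "pyTag"), ("tagged", "pyTag"),
   ("pymix", "pyTag"), ("py_mix", "pyTag"),
   ("pyunt", "pyUnt"), ("py_untagged", "pyUnt"), ("untagged", "pyUnt"),
   ("pyuntag", "pyUnt")]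

-- the while-True loop of Source B; fuel only bounds the loop (never exhausted in fact)
def normAuxB : Nat → String → String → Bool → String
  | 0, _, n, _ => n
  | fuel+1, name, n, stripped =>
    match bTable.get? n with
    | some v => v
    | none =>
      if PySem.Str.startswith n "adv_" then
        normAuxB fuel name (PySem.Str.replace n "adv_" "") true
      else if stripped then n else name

def normalize_lang_name_alt (name : String) : String :=
  normAuxB (name.length + 1) name (PySem.Str.lower name) false

-- ===== PRECONDITION & SPEC =====
def Spec_normalize_lang_name (name : String) (out : String) : Prop := out = normalize_lang_name_alt name
instance (name : String) (out : String) : Decidable (Spec_normalize_lang_name name out) := by unfold Spec_normalize_lang_name; infer_instance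

-- ===== CLAIM (what is proved, stated in full; the proofs are below) =====
def Claim_equal_normalize_lang_name : Prop := ∀ (name : String), Dom_normalize_lang_name name → Spec_normalize_lang_name name (normalize_lang_name name)

-- ===== LEMMAS AND PROOFS =====

-- every character of `replace.go old [] fuel l acc` comes from acc or l
theorem mem_replace_go (old : List Char) :
    ∀ (fuel : Nat) (l acc : List Char) (c : Char),
      c ∈ PySem.Chars.replace.go old [] fuel l acc → c ∈ acc ∨ c ∈ l := by
  intro fuel
  induction fuel with
  | zero =>
    intro l acc c h
    simp [PySem.Chars.replace.go] at h
    tauto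
  | succ f ih =>
    intro l acc c h
    cases l with
    | nil =>
      simp [PySem.Chars.replace.go] at h
      tauto
    | cons a t =>
      simp only [PySem.Chars.replace.go] at h
      split at h
      · rcases ih _ _ _ h with h' | h'
        · simp at h'; tauto
        · right; exact List.mem_of_mem_drop h'
      · rcases ih _ _ _ h with h' | h'
        · simp at h'
          rcases h' with h' | h'
          · subst h'; simp
          · tauto
        · right; simp [h']

theorem mem_replace (old : List Char) (l : List Char) (c : Char)
    (h : c ∈ PySem.Chars.replace l old []) : c ∈ l := by
  unfold PySem.Chars.replace at h
  split at h
  · simp at h; tauto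
  · rcases mem_replace_go old _ _ _ _ h with h' | h'
    · simp at h'
    · exact h'

theorem lowerChar_idem (c : Char) :
    PySem.Chars.lowerChar (PySem.Chars.lowerChar c) = PySem.Chars.lowerChar c := by
  unfold PySem.Chars.lowerChar PySem.Chars.isupper
  by_cases hA : 'A' ≤ c
  · by_cases hZ : c ≤ 'Z'
    · have h1 : 65 ≤ c.toNat := hA
      have h2 : c.toNat ≤ 90 := hZ
      have hv : (c.toNat + 32).isValidChar := Or.inl (by omega)
      have ht : (Char.ofNat (c.toNat + 32)).toNat = c.toNat + 32 := by
        rw [Char.toNat_ofNat, if_pos hv]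
      have hZ' : ¬ (Char.ofNat (c.toNat + 32) ≤ 'Z') := by
        intro hc
        have : (Char.ofNat (c.toNat + 32)).toNat ≤ 90 := hc
        omega
      simp [hA, hZ, hZ']
    · simp [hZ]
  · simp [hA]

-- lower-fixed strings: every char is fixed by lowerChar
def LFixed (l : List Char) : Prop := ∀ c ∈ l, PySem.Chars.lowerChar c = c

theorem lfixed_lower (l : List Char) : LFixed (PySem.Chars.lower l) := by
  intro c hc
  simp [PySem.Chars.lower] at hc
  obtain ⟨a, _, rfl⟩ := hc
  exact lowerChar_idem a

theorem lower_of_lfixed (l : List Char) (h : LFixed l) : PySem.Chars.lower l = l := by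
  unfold PySem.Chars.lower
  induction l with
  | nil => rfl
  | cons a t ih =>
    simp [h a (by simp), ih (fun c hc => h c (by simp [hc]))]

theorem lfixed_replace (l : List Char) (h : LFixed l) :
    LFixed (PySem.Chars.replace l "adv_".toList []) :=
  fun c hc => h c (mem_replace _ _ _ hc)

theorem str_lower_of_lfixed (n : String) (h : LFixed n.toList) :
    PySem.Str.lower n = n := by
  unfold PySem.Str.lower
  rw [lower_of_lfixed _ h]
  simp

theorem lfixed_str_replace (n : String) (h : LFixed n.toList) :
    LFixed (PySem.Str.replace n "adv_" "").toList := by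
  simp only [PySem.Str.replace]
  intro c hc
  simp at hc
  exact lfixed_replace _ h c hc

-- A's recursion equals B's loop (with stripped = true) on lower-fixed strings, any carried name
theorem aux_eq : ∀ (fuel : Nat) (n ign : String), LFixed n.toList →
    normAuxA fuel n = normAuxB fuel ign n true := by
  intro fuel
  induction fuel with
  | zero => intro n ign _; rfl
  | succ f ih =>
    intro n ign h
    have hlow : PySem.Str.lower n = n := str_lower_of_lfixed n h
    simp only [normAuxA, normAuxB, hlow]
    by_cases h1 : n = "java"
    · subst h1; rfl
    by_cases h2 : n = "pytag"
    · subst h2; rfl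
    by_cases h3 : n = "py_tag"
    · subst h3; rfl
    by_cases h4 : n = "tagged"
    · subst h4; rfl
    by_cases h5 : n = "pymix"
    · subst h5; rfl
    by_cases h6 : n = "py_mix"
    · subst h6; rfl
    by_cases h7 : n = "pyunt"
    · subst h7; rfl
    by_cases h8 : n = "py_untagged"
    · subst h8; rfl
    by_cases h9 : n = "untagged"
    · subst h9; rfl
    by_cases h10 : n = "pyuntag"
    · subst h10; rfl
    have e1 : ("java" == n) = false := by simp [Ne.symm h1]
    have e2 : ("pytag" == n) = false := by simp [Ne.symm h2]
    have e3 : ("py_tag" == n) = false := by simp [Ne.symm h3]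
    have e4 : ("tagged" == n) = false := by simp [Ne.symm h4]
    have e5 : ("pymix" == n) = false := by simp [Ne.symm h5]
    have e6 : ("py_mix" == n) = false := by simp [Ne.symm h6]
    have e7 : ("pyunt" == n) = false := by simp [Ne.symm h7]
    have e8 : ("py_untagged" == n) = false := by simp [Ne.symm h8]
    have e9 : ("untagged" == n) = false := by simp [Ne.symm h9]
    have e10 : ("pyuntag" == n) = false := by simp [Ne.symm h10]
    have hg : bTable.get? n = none := by
      simp [bTable, PySem.Dict.get?, List.find?, e1, e2, e3, e4, e5, e6, e7, e8, e9, e10]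
    by_cases hs : PySem.Str.startswith n "adv_" = true <;>
      simp [PySem.Str.startswith] at hs <;>
      simp [h1, h2, h3, h4, h5, h6, h7, h8, h9, h10, hs, hg]
    exact ih _ ign (lfixed_str_replace n h)

-- ===== VERDICT (by name: the statement is the Claim_ definition above) =====
theorem normalize_lang_name_spec : Claim_equal_normalize_lang_name := by
  intro name _
  unfold Spec_normalize_lang_name normalize_lang_name normalize_lang_name_alt
  simp only [normAuxA, normAuxB]
  generalize hm : PySem.Str.lower name = m
  have hlf : LFixed m.toList := by
    rw [← hm]
    unfold PySem.Str.lower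
    intro c hc
    simp at hc
    exact lfixed_lower _ c hc
  by_cases h1 : m = "java"
  · subst h1; rfl
  by_cases h2 : m = "pytag"
  · subst h2; rfl
  by_cases h3 : m = "py_tag"
  · subst h3; rfl
  by_cases h4 : m = "tagged"
  · subst h4; rfl
  by_cases h5 : m = "pymix"
  · subst h5; rfl
  by_cases h6 : m = "py_mix"
  · subst h6; rfl
  by_cases h7 : m = "pyunt"
  · subst h7; rfl
  by_cases h8 : m = "py_untagged"
  · subst h8; rfl
  by_cases h9 : m = "untagged"
  · subst h9; rfl
  by_cases h10 : m = "pyuntag"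
  · subst h10; rfl
  have e1 : ("java" == m) = false := by simp [Ne.symm h1]
  have e2 : ("pytag" == m) = false := by simp [Ne.symm h2]
  have e3 : ("py_tag" == m) = false := by simp [Ne.symm h3]
  have e4 : ("tagged" == m) = false := by simp [Ne.symm h4]
  have e5 : ("pymix" == m) = false := by simp [Ne.symm h5]
  have e6 : ("py_mix" == m) = false := by simp [Ne.symm h6]
  have e7 : ("pyunt" == m) = false := by simp [Ne.symm h7]
  have e8 : ("py_untagged" == m) = false := by simp [Ne.symm h8]
  have e9 : ("untagged" == m) = false := by simp [Ne.symm h9]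
  have e10 : ("pyuntag" == m) = false := by simp [Ne.symm h10]
  have hg : bTable.get? m = none := by
    simp [bTable, PySem.Dict.get?, List.find?, e1, e2, e3, e4, e5, e6, e7, e8, e9, e10]
  by_cases hs : PySem.Str.startswith m "adv_" = true <;>
    simp [PySem.Str.startswith] at hs <;>
    simp [h1, h2, h3, h4, h5, h6, h7, h8, h9, h10, hs, hg]
  exact aux_eq _ _ name (lfixed_str_replace m hlf)
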